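-- pv_equiv track=rewrite | github.com/Azukiro/Sokoban | Redim_img.py | redim
-- ===== SOURCE A (Python) =====
-- def redim(M,Colonne_keep,Colonne_total):
--
--     '''
--     Fonction recréant la matrice selon la taille voulu pour le jeu
--     '''
--
--     colonne_loose=Colonne_total-Colonne_keep #le nombre de colonne sur lesquelles on veutt travailler et le nombre qu'on veut garder ex:1/4 je garde 1 colonne sur 4
--     tuple_result=tuple(range(colonne_loose))
--
--     i=0
--     count=0
--     while True:
--         if (count %Colonne_total) in tuple_result:#on supprime un colonne si celle-ci à un numéro de colonne à supprimer
--             M.pop(i)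
--         else:
--             i+=1
--         if i == len(M):
--             break
--         count+=1
--         j=0
--         counter = 0
--         while j < len(M[i]):#Dans chaque ligne on supprime j s'il appartient au tuple des colonnes et lignes à supprimer
--
--             if (counter %Colonne_total) in tuple_result:
--                 M[i].pop(j)
--             else:
--                 j+=1
--             counter+=1
--     return M
-- ===== SOURCE B (Python) =====
-- def redim(M, Colonne_keep, Colonne_total):
--     # Rebuilds the matrix in one pass, keeping row/column indices whose
--     # index mod Colonne_total falls outside range(Colonne_total - Colonne_keep).
--     # Note: A mutates M in place; B leaves M untouched (return value is the same).
--     colonne_loose = Colonne_total - Colonne_keep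
--     def kept(idx):
--         return (idx % Colonne_total) not in range(colonne_loose)
--     return [[x for c, x in enumerate(row) if kept(c)]
--             for r, row in enumerate(M) if kept(r)]
-- ===== Notes on version B (the rewrite author's own statement) =====
-- stated objective: faster
-- what changed: Replaces the in-place double while-loop with repeated list.pop (each pop shifts the tail) by a single-pass rebuild: nested comprehensions keep exactly the row/column indices whose index mod Colonne_total is outside range(Colonne_total-Colonne_keep).
import Mathlib
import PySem

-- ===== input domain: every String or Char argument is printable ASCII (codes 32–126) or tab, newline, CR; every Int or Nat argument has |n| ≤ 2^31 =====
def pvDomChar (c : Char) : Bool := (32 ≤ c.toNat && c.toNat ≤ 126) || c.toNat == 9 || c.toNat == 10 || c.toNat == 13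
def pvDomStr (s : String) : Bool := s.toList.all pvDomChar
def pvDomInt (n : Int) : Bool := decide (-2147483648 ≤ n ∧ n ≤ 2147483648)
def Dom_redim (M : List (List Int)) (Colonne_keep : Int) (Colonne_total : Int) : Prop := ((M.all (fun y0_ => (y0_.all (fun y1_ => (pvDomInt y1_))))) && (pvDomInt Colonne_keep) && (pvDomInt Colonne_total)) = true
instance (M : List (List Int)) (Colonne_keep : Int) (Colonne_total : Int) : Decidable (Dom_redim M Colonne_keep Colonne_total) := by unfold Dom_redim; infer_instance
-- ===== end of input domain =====

-- B rebuilds the matrix in one pass with nested filters instead of A's in-place nested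
-- pop loops (objective: faster). A mutates M in place; B does not — the equivalence is
-- about the return value.

-- ===== PORT A =====
-- inner 'while j < len(M[i])' loop: pops row[j] when counter % total is in tuple_result
def redimInnerA (Colonne_total : Int) (tupleResult : List Int) (row : List Int) (j : Nat) (counter : Int) : List Int :=
  if hj : j < row.length then
    if tupleResult.contains (PySem.Int.mod counter Colonne_total) then
      redimInnerA Colonne_total tupleResult (row.eraseIdx j) j (counter + 1)
    else
      redimInnerA Colonne_total tupleResult row (j + 1) (counter + 1)
  else row
termination_by row.length - j
decreasing_by
  · simp only [List.length_eraseIdx_of_lt hj]; omega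
  · omega

-- outer 'while True' loop; the branches returning the list unchanged are Python's
-- IndexError (M.pop(i) / M[i] out of range), unreachable under Pre_redim
def redimOuterA (Colonne_total : Int) (tupleResult : List Int) (M : List (List Int)) (i : Nat) (count : Int) : List (List Int) :=
  if tupleResult.contains (PySem.Int.mod count Colonne_total) then
    if hi : i < M.length then
      if i = (M.eraseIdx i).length then M.eraseIdx i
      else
        if h2 : i < (M.eraseIdx i).length then
          redimOuterA Colonne_total tupleResult
            ((M.eraseIdx i).set i (redimInnerA Colonne_total tupleResult ((M.eraseIdx i)[i]'h2) 0 0)) i (count + 1)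
        else M.eraseIdx i
    else M
  else
    if i + 1 = M.length then M
    else
      if h2 : i + 1 < M.length then
        redimOuterA Colonne_total tupleResult
          (M.set (i + 1) (redimInnerA Colonne_total tupleResult (M[i + 1]'h2) 0 0)) (i + 1) (count + 1)
      else M
termination_by M.length - i
decreasing_by
  · have := List.length_eraseIdx_of_lt hi
    simp only [List.length_set, this]; omega
  · simp only [List.length_set]; omega

def redim (M : List (List Int)) (Colonne_keep : Int) (Colonne_total : Int) : List (List Int) :=
  let colonne_loose := Colonne_total - Colonne_keep
  let tupleResult := PySem.List.pyRange 0 colonne_loose 1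
  redimOuterA Colonne_total tupleResult M 0 0

-- ===== PORT B =====
-- kept(idx) = (idx % Colonne_total) not in range(colonne_loose)
def keptB (Colonne_total : Int) (colonne_loose : Int) (idx : Int) : Bool :=
  !((PySem.List.pyRange 0 colonne_loose 1).contains (PySem.Int.mod idx Colonne_total))

-- nested comprehensions over enumerate
def redim_alt (M : List (List Int)) (Colonne_keep : Int) (Colonne_total : Int) : List (List Int) :=
  let colonne_loose := Colonne_total - Colonne_keep
  ((PySem.List.enumerate M 0).filter (fun p => keptB Colonne_total colonne_loose p.1)).map
    (fun p => ((PySem.List.enumerate p.2 0).filter (fun q => keptB Colonne_total colonne_loose q.1)).map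
      (fun q => q.2))

-- ===== PRECONDITION & SPEC =====
-- Pre_ excludes exactly the inputs where the Python A raises: empty M (IndexError) and
-- Colonne_total = 0 (ZeroDivisionError from count % Colonne_total).
def Pre_redim (M : List (List Int)) (Colonne_keep : Int) (Colonne_total : Int) : Prop :=
  M ≠ [] ∧ Colonne_total ≠ 0
instance (M : List (List Int)) (Colonne_keep : Int) (Colonne_total : Int) : Decidable (Pre_redim M Colonne_keep Colonne_total) := by unfold Pre_redim; infer_instance

def pvWitness_redim : List (List Int) × Int × Int := ([[1, 2, 3], [4, 5, 6], [7, 8, 9]], 1, 2)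

def Spec_redim (M : List (List Int)) (Colonne_keep : Int) (Colonne_total : Int) (out : List (List Int)) : Prop := out = redim_alt M Colonne_keep Colonne_total
instance (M : List (List Int)) (Colonne_keep : Int) (Colonne_total : Int) (out : List (List Int)) : Decidable (Spec_redim M Colonne_keep Colonne_total out) := by unfold Spec_redim; infer_instance

-- ===== CLAIM (what is proved, stated in full; the proofs are below) =====
def Claim_equal_redim : Prop := ∀ (M : List (List Int)) (Colonne_keep : Int) (Colonne_total : Int), Dom_redim M Colonne_keep Colonne_total → Pre_redim M Colonne_keep Colonne_total → Spec_redim M Colonne_keep Colonne_total (redim M Colonne_keep Colonne_total)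
-- ===== LEMMAS AND PROOFS =====

-- reference filters (proof-side only)
def filtCols (T : Int) (tup : List Int) : List Int → Int → List Int
  | [], _ => []
  | x :: xs, c =>
      if tup.contains (PySem.Int.mod c T) then filtCols T tup xs (c + 1)
      else x :: filtCols T tup xs (c + 1)

def filtRows (T : Int) (tup : List Int) : List (List Int) → Int → List (List Int)
  | [], _ => []
  | r :: rs, c =>
      if tup.contains (PySem.Int.mod c T) then filtRows T tup rs (c + 1)
      else filtCols T tup r 0 :: filtRows T tup rs (c + 1)

theorem eraseIdx_mid {α : Type} (pre : List α) (x : α) (xs : List α) :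
    (pre ++ x :: xs).eraseIdx pre.length = pre ++ xs := by
  induction pre with
  | nil => simp
  | cons a l ih => simpa using ih

theorem set_mid {α : Type} (pre : List α) (x y : α) (xs : List α) :
    (pre ++ x :: xs).set pre.length y = pre ++ y :: xs := by
  induction pre with
  | nil => simp
  | cons a l ih => simpa using ih

theorem innerA_spec (T : Int) (tup : List Int) (rest pre : List Int) (c : Int) :
    redimInnerA T tup (pre ++ rest) pre.length c = pre ++ filtCols T tup rest c := by
  induction rest generalizing pre c with
  | nil =>
      rw [redimInnerA]
      simp [filtCols]
  | cons x xs ih =>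
      rw [redimInnerA]
      rw [dif_pos (by simp)]
      by_cases hc : tup.contains (PySem.Int.mod c T)
      · rw [if_pos hc, eraseIdx_mid, ih, filtCols, if_pos hc]
      · rw [if_neg hc]
        have h1 : pre.length + 1 = (pre ++ [x]).length := by simp
        have h2 : pre ++ x :: xs = (pre ++ [x]) ++ xs := by simp
        rw [h1, h2, ih, filtCols, if_neg hc]
        simp

theorem getElem_mid {α : Type} (pre : List α) (x : α) (xs : List α) (h : pre.length < (pre ++ x :: xs).length) :
    (pre ++ x :: xs)[pre.length]'h = x := by
  induction pre with
  | nil => simp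
  | cons a l ih => simpa using ih (by simp)

theorem outerA_spec (T : Int) (tup : List Int) (rs : List (List Int)) (pre : List (List Int))
    (r : List Int) (c : Int) :
    redimOuterA T tup (pre ++ r :: rs) pre.length c =
      pre ++ (if tup.contains (PySem.Int.mod c T) then filtRows T tup rs (c + 1)
              else r :: filtRows T tup rs (c + 1)) := by
  induction rs generalizing pre r c with
  | nil =>
      rw [redimOuterA]
      by_cases hc : tup.contains (PySem.Int.mod c T)
      · have hm : PySem.Int.mod c T ∈ tup := by simpa using hc
        rw [if_pos hc, dif_pos (by simp), eraseIdx_mid, if_pos (by simp)]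
        simp [filtRows, hm]
      · have hm : PySem.Int.mod c T ∉ tup := by simpa using hc
        rw [if_neg hc, if_pos (by simp)]
        simp [filtRows, hm]
  | cons s rs' ih =>
      have hinner : redimInnerA T tup s 0 0 = filtCols T tup s 0 := by
        simpa using innerA_spec T tup s [] 0
      rw [redimOuterA]
      by_cases hc : tup.contains (PySem.Int.mod c T)
      · have hm : PySem.Int.mod c T ∈ tup := by simpa using hc
        rw [if_pos hc, dif_pos (by simp), eraseIdx_mid, if_neg (by simp),
            dif_pos (by simp), getElem_mid pre s rs' (by simp), set_mid, hinner, ih]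
        simp [filtRows, hm]
      · have hm : PySem.Int.mod c T ∉ tup := by simpa using hc
        rw [if_neg hc, if_neg (by simp), dif_pos (by simp)]
        have hre : pre ++ r :: s :: rs' = (pre ++ [r]) ++ s :: rs' := by simp
        have hlen : pre.length + 1 = (pre ++ [r]).length := by simp
        simp only [hre, hlen]
        rw [getElem_mid (pre ++ [r]) s rs' (by simp), set_mid, hinner, ih]
        simp [filtRows, hm]

theorem filtCols_nil (T : Int) (row : List Int) (c : Int) : filtCols T [] row c = row := by
  induction row generalizing c with
  | nil => rfl
  | cons x xs ih => simp [filtCols, ih]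

theorem altCols_spec (T loose : Int) (row : List Int) (s : Int) :
    ((PySem.List.enumerate row s).filter (fun q => keptB T loose q.1)).map (fun q => q.2)
      = filtCols T (PySem.List.pyRange 0 loose 1) row s := by
  induction row generalizing s with
  | nil => simp [PySem.List.enumerate_nil, filtCols]
  | cons x xs ih =>
      rw [PySem.List.enumerate_cons, List.filter_cons]
      by_cases hP : 0 ≤ PySem.Int.mod s T ∧ PySem.Int.mod s T < loose
      · have hk : keptB T loose s = false := by
          simp only [keptB, Bool.not_eq_false']
          simp [PySem.List.mem_pyRange_one]
          omega
        rw [if_neg (by simp [hk]), ih, filtCols,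
            if_pos (by simp [PySem.List.mem_pyRange_one]; exact hP)]
      · have hk : keptB T loose s = true := by
          simp only [keptB, Bool.not_eq_true']
          simp [PySem.List.mem_pyRange_one]
          omega
        rw [if_pos (by simp [hk]), List.map_cons, ih, filtCols,
            if_neg (by simp [PySem.List.mem_pyRange_one]; omega)]

theorem altRows_spec (T loose : Int) (Ms : List (List Int)) (s : Int) :
    ((PySem.List.enumerate Ms s).filter (fun p => keptB T loose p.1)).map
        (fun p => ((PySem.List.enumerate p.2 0).filter (fun q => keptB T loose q.1)).map (fun q => q.2))
      = filtRows T (PySem.List.pyRange 0 loose 1) Ms s := by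
  induction Ms generalizing s with
  | nil => simp [PySem.List.enumerate_nil, filtRows]
  | cons r rs ih =>
      rw [PySem.List.enumerate_cons, List.filter_cons]
      by_cases hP : 0 ≤ PySem.Int.mod s T ∧ PySem.Int.mod s T < loose
      · have hk : keptB T loose s = false := by
          simp only [keptB, Bool.not_eq_false']
          simp [PySem.List.mem_pyRange_one]
          omega
        rw [if_neg (by simp [hk]), ih, filtRows,
            if_pos (by simp [PySem.List.mem_pyRange_one]; exact hP)]
      · have hk : keptB T loose s = true := by
          simp only [keptB, Bool.not_eq_true']
          simp [PySem.List.mem_pyRange_one]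
          omega
        rw [if_pos (by simp [hk]), List.map_cons, ih, filtRows,
            if_neg (by simp [PySem.List.mem_pyRange_one]; omega)]
        rw [altCols_spec]

theorem mod_zero_left (T : Int) : PySem.Int.mod 0 T = 0 :=
  (PySem.Int.mod_eq_zero_iff_dvd 0 T).mpr (dvd_zero T)

-- ===== VERDICT (by name: the statement is the Claim_ definition above) =====
theorem redim_spec : Claim_equal_redim := by
  intro M k T _ hpre
  unfold Spec_redim redim redim_alt
  obtain ⟨r, rs, rfl⟩ : ∃ r rs, M = r :: rs := by
    cases M with
    | nil => exact absurd rfl hpre.1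
    | cons a l => exact ⟨a, l, rfl⟩
  rw [altRows_spec]
  have h0 := outerA_spec T (PySem.List.pyRange 0 (T - k) 1) rs [] r 0
  simp only [List.nil_append, List.length_nil] at h0
  rw [h0, filtRows]
  by_cases hP : 0 ≤ PySem.Int.mod 0 T ∧ PySem.Int.mod 0 T < T - k
  · have hc : (PySem.List.pyRange 0 (T - k) 1).contains (PySem.Int.mod 0 T) = true := by
      simp [PySem.List.mem_pyRange_one]; omega
    rw [if_pos hc, if_pos hc]
  · have hc : ¬ ((PySem.List.pyRange 0 (T - k) 1).contains (PySem.Int.mod 0 T) = true) := by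
      intro hct
      have hm : PySem.Int.mod 0 T ∈ PySem.List.pyRange 0 (T - k) 1 := by simpa using hct
      rw [PySem.List.mem_pyRange_one] at hm
      exact hP hm
    rw [if_neg hc, if_neg hc]
    have hloose : T - k ≤ 0 := by
      have hm0 : PySem.Int.mod 0 T = 0 := mod_zero_left T
      rw [hm0] at hP
      by_contra hcon
      exact hP ⟨le_refl 0, by omega⟩
    rw [PySem.List.pyRange_one_eq_nil hloose, filtCols_nil]
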